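-- pv_equiv track=rewrite | github.com/dotunpeters/coding_challenge | vh travling is fun.py | connectedCities
-- ===== SOURCE A (Python) =====
-- def connectedCities(n, threshold, originCities, destinationCities):
--     # Write your code here
--     result = []
--
--     #Function returns path existence
--     def gcd(x, y, threshold):
--         x_gcd = []
--         y_gcd = []
--
--         #append each divisor of x to x_gcd
--         for i in range(x):
--             i += 1
--             if x%i == 0:
--                 x_gcd.append(i)
--
--         #append each divisor of y to y_gcd
--         for i in range(y):
--             i += 1
--             if y%i == 0:
--                 y_gcd.append(i)
--
--
--         x_gcd = [x for x in x_gcd if x > threshold]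
--         y_gcd = [y for y in y_gcd if y > threshold]
--         if len(x_gcd) == 0 or len(y_gcd) == 0:
--             return 0
--         else:
--             return 1
--
--     #Iterate and check if Greatest Common Divisor exist to append the
--     #corresponding return to the result list
--     n = len(originCities)
--     for i in range(n):
--         if gcd(originCities[i], destinationCities[i], threshold) == 1:
--             result.append(1)
--         else:
--             result.append(0)
--     return result
-- ===== SOURCE B (Python) =====
-- def connectedCities(n, threshold, originCities, destinationCities):
--     # A city value x (>=1) always has x as its own largest divisor, so a
--     # divisor > threshold exists iff x > threshold and x > 0.
--     return [1 if o > threshold and o > 0 and d > threshold and d > 0 else 0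
--             for o, d in zip(originCities, destinationCities)]
-- ===== Notes on version B (the rewrite author's own statement) =====
-- stated objective: faster
-- what changed: Replaces per-query enumeration of all divisors of both city values with a single zip pass using the direct test o > threshold and o > 0 (the largest divisor of a positive x is x itself; nonpositive x has no divisors in A's scan).
import Mathlib
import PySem

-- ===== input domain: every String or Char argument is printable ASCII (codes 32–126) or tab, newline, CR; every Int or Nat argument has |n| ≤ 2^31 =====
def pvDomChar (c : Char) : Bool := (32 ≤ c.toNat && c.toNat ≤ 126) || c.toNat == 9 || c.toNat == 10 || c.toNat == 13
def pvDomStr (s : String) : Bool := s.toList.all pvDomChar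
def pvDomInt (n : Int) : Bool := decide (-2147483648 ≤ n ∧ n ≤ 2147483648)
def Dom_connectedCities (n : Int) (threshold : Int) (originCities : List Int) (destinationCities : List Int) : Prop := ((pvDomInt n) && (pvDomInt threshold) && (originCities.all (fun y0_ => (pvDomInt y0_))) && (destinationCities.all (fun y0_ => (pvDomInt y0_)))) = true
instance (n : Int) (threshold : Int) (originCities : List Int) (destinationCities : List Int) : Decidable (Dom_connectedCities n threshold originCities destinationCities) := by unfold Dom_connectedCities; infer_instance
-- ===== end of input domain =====

-- B replaces A's per-query divisor enumeration with a direct threshold comparison per zipped pair.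

-- ===== PORT A =====
-- inner helper gcd(x, y, threshold): collect divisors of x and of y by scanning 1..x / 1..y
def pvGcdA (x : Int) (y : Int) (threshold : Int) : Int :=
  let x_gcd := (PySem.List.pyRange 0 x).foldl
    (fun acc i => let i := i + 1; if PySem.Int.mod x i = 0 then acc ++ [i] else acc) []
  let y_gcd := (PySem.List.pyRange 0 y).foldl
    (fun acc i => let i := i + 1; if PySem.Int.mod y i = 0 then acc ++ [i] else acc) []
  let x_gcd := x_gcd.filter (fun v => decide (threshold < v))
  let y_gcd := y_gcd.filter (fun v => decide (threshold < v))
  if x_gcd.length = 0 ∨ y_gcd.length = 0 then 0 else 1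

def connectedCities (n : Int) (threshold : Int) (originCities : List Int) (destinationCities : List Int) : List Int :=
  -- A rebinds n = len(originCities); indexing is exact under Pre_ (both lists long enough)
  let n := (originCities.length : Int)
  (PySem.List.pyRange 0 n).foldl
    (fun result i =>
      if pvGcdA (PySem.List.pyGetD originCities i 0) (PySem.List.pyGetD destinationCities i 0) threshold = 1
      then result ++ [1] else result ++ [0]) []

-- ===== PORT B =====
def connectedCities_alt (n : Int) (threshold : Int) (originCities : List Int) (destinationCities : List Int) : List Int :=
  (originCities.zip destinationCities).map
    (fun p => if threshold < p.1 ∧ 0 < p.1 ∧ threshold < p.2 ∧ 0 < p.2 then 1 else 0)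

-- ===== PRECONDITION & SPEC =====
-- A indexes destinationCities[i] for every i < len(originCities) and raises IndexError
-- when destinationCities is shorter; exactly those inputs are excluded.
def Pre_connectedCities (n : Int) (threshold : Int) (originCities : List Int) (destinationCities : List Int) : Prop :=
  originCities.length ≤ destinationCities.length
instance (n : Int) (threshold : Int) (originCities : List Int) (destinationCities : List Int) : Decidable (Pre_connectedCities n threshold originCities destinationCities) := by unfold Pre_connectedCities; infer_instance
def pvWitness_connectedCities : Int × Int × List Int × List Int := (2, 3, [4, 5], [6, 1])

def Spec_connectedCities (n : Int) (threshold : Int) (originCities : List Int) (destinationCities : List Int) (out : List Int) : Prop := out = connectedCities_alt n threshold originCities destinationCities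
instance (n : Int) (threshold : Int) (originCities : List Int) (destinationCities : List Int) (out : List Int) : Decidable (Spec_connectedCities n threshold originCities destinationCities out) := by unfold Spec_connectedCities; infer_instance

-- ===== CLAIM (what is proved, stated in full; the proofs are below) =====
def Claim_equal_connectedCities : Prop := ∀ (n : Int) (threshold : Int) (originCities : List Int) (destinationCities : List Int), Dom_connectedCities n threshold originCities destinationCities → Pre_connectedCities n threshold originCities destinationCities → Spec_connectedCities n threshold originCities destinationCities (connectedCities n threshold originCities destinationCities)

-- ===== LEMMAS AND PROOFS =====

-- the divisor scan of A, in filter form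
theorem pvDivScan_eq_filter (x : Int) :
    (PySem.List.pyRange 0 x).foldl
      (fun acc i => let i := i + 1; if PySem.Int.mod x i = 0 then acc ++ [i] else acc) [] =
    ((PySem.List.pyRange 0 x).map (· + 1)).filter (fun i => decide (PySem.Int.mod x i = 0)) := by
  rw [show (fun (acc : List Int) (i : Int) =>
        let i := i + 1; if PySem.Int.mod x i = 0 then acc ++ [i] else acc) =
      (fun acc i => if PySem.Int.mod x (i + 1) = 0 then acc ++ [i + 1] else acc) from rfl]
  rw [← List.foldl_map (f := (· + 1 : Int → Int))
        (g := fun acc i => if PySem.Int.mod x i = 0 then acc ++ [i] else acc)]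
  rw [show (fun (acc : List Int) (i : Int) => if PySem.Int.mod x i = 0 then acc ++ [i] else acc) =
      (fun acc i => if decide (PySem.Int.mod x i = 0) = true then acc ++ [i] else acc)
      from by funext a i; by_cases h : PySem.Int.mod x i = 0 <;> simp [h]]
  rw [PySem.List.foldl_append_if_eq_filter]
  simp

-- a filtered divisor list is nonempty iff the value itself qualifies
theorem pvDivScan_nonempty (x t : Int) :
    (((PySem.List.pyRange 0 x).map (· + 1)).filter
        (fun i => decide (PySem.Int.mod x i = 0))).filter (fun v => decide (t < v)) ≠ [] ↔
    (0 < x ∧ t < x) := by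
  rw [← List.isEmpty_eq_false_iff, List.isEmpty_eq_false_iff_exists_mem]
  constructor
  · rintro ⟨j, hj⟩
    simp only [List.mem_filter, List.mem_map, PySem.List.mem_pyRange_one, decide_eq_true_eq] at hj
    obtain ⟨⟨⟨i, ⟨hi0, hix⟩, hij⟩, _⟩, htj⟩ := hj
    omega
  · rintro ⟨hx, htx⟩
    refine ⟨x, ?_⟩
    simp only [List.mem_filter, List.mem_map, PySem.List.mem_pyRange_one, decide_eq_true_eq]
    exact ⟨⟨⟨x - 1, ⟨by omega, by omega⟩, by ring⟩,
      (PySem.Int.mod_eq_zero_iff_dvd x x).2 dvd_rfl⟩, htx⟩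

-- A's inner helper equals the direct comparison
theorem pvGcdA_eq (x y t : Int) :
    pvGcdA x y t = if t < x ∧ 0 < x ∧ t < y ∧ 0 < y then 1 else 0 := by
  have hx := pvDivScan_nonempty x t
  have hy := pvDivScan_nonempty y t
  unfold pvGcdA
  simp only [pvDivScan_eq_filter, List.length_eq_zero_iff]
  by_cases h : t < x ∧ 0 < x ∧ t < y ∧ 0 < y
  · rw [if_pos h, if_neg (not_or.2 ⟨hx.2 ⟨h.2.1, h.1⟩, hy.2 ⟨h.2.2.2, h.2.2.1⟩⟩)]
  · rw [if_neg h, if_pos]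
    by_contra hc
    rw [not_or] at hc
    exact h ⟨(hx.1 hc.1).2, (hx.1 hc.1).1, (hy.1 hc.2).2, (hy.1 hc.2).1⟩

-- ===== VERDICT (by name: the statement is the Claim_ definition above) =====
theorem connectedCities_spec : Claim_equal_connectedCities := by
  intro n t o d _ hpre
  unfold Spec_connectedCities connectedCities connectedCities_alt
  unfold Pre_connectedCities at hpre
  rw [show (fun (result : List Int) (i : Int) =>
        if pvGcdA (PySem.List.pyGetD o i 0) (PySem.List.pyGetD d i 0) t = 1
        then result ++ [1] else result ++ [0]) =
      (fun result i => result ++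
        [if pvGcdA (PySem.List.pyGetD o i 0) (PySem.List.pyGetD d i 0) t = 1 then (1 : Int) else 0])
      from by funext r i; split_ifs <;> rfl]
  rw [PySem.List.foldl_append_singleton_eq_map, List.nil_append,
    PySem.List.pyRange_zero_natCast, List.map_map]
  apply List.ext_getElem
  · simp; omega
  · intro i h1 h2
    have hio : i < o.length := by simpa using h1
    have hid : i < d.length := by omega
    simp only [List.getElem_map, Function.comp_apply, List.getElem_range, List.getElem_zip,
      PySem.List.pyGetD_natCast]
    rw [List.getD_eq_getElem o 0 hio, List.getD_eq_getElem d 0 hid, pvGcdA_eq]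
    split_ifs <;> simp_all
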